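-- pv_equiv track=rewrite | github.com/jjdmol/LOFAR | branches/Cobalt-Task5903-broken/LCU/PPSTune/ppstune.py | distance_forward
-- ===== SOURCE A (Python) =====
-- def distance_forward(sequence, item):
--     r'''
--     Compute the number of elements one has to advance to find ``item``
--     in ``sequence`` for each element in the sequence.
--
--     **Parameters**
--
--     sequence : sequence
--         The sequence to scan.
--
--     item : object
--         The instance to search for.
--
--     **Returns**
--
--     A list of integers with the same length as ``sequence``. If an
--     ``item`` is not found in forward direction, substitute the length
--     of the ``sequence``.
--
--     **Examples**
--
--     >>> distance_forward([0, 0, 0, 1, 1, 0, 0, 0, 0, 1, 1], item = 1)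
--     [3, 2, 1, 0, 0, 4, 3, 2, 1, 0, 0]
--     >>> distance_forward([0, 0, 0, 1, 1, 0, 0, 0, 0], item = 1)
--     [3, 2, 1, 0, 0, 9, 9, 9, 9]
--     >>> distance_forward('elephant', item = 'h')
--     [4, 3, 2, 1, 0, 8, 8, 8]
--
--     '''
--     distance = []
--     index    = 0
--     length   = len(sequence)
--     while index < length:
--         if sequence[index] != item:
--             try:
--                 next_false  = sequence[index:].index(item)
--                 for distance_to_next in range(next_false, 0, -1):
--                     distance.append(distance_to_next)
--                     index += 1
--             except ValueError:
--                 while index < length: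
--                     distance.append(length)
--                     index += 1
--         else:
--             distance.append(0)
--             index += 1
--     return distance
-- ===== SOURCE B (Python) =====
-- def distance_forward(sequence, item):
--     # Single backward pass: keep the distance to the next occurrence seen so far,
--     # with len(sequence) as the "no item ahead" sentinel.
--     n = len(sequence)
--     out = [0] * n
--     dist = n
--     for i in range(n - 1, -1, -1):
--         if sequence[i] == item:
--             dist = 0
--         elif dist < n:
--             dist += 1
--         out[i] = dist
--     return out
-- ===== Notes on version B (the rewrite author's own statement) =====
-- stated objective: alternative
-- what changed: Replaced the forward scan that re-searches the remaining suffix with .index() at every gap by a single backward pass that maintains the distance to the last occurrence seen (sentinel n for no occurrence ahead).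
import Mathlib
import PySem

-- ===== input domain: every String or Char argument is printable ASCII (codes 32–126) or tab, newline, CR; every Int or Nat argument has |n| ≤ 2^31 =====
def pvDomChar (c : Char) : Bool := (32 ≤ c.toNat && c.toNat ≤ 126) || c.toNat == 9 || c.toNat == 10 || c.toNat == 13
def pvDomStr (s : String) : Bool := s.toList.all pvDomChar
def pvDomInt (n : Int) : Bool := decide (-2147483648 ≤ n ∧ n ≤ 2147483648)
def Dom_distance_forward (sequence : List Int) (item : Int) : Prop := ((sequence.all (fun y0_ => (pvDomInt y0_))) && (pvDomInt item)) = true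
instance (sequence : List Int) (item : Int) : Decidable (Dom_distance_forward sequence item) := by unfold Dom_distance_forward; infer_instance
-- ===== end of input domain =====

-- B replaces A's forward scan (re-searching the remaining suffix with .index() at each gap)
-- by a single backward pass tracking the distance to the last occurrence seen (alternative algorithm).


-- ===== PORT A =====
-- inner `while index < length: distance.append(length); index += 1` (ValueError branch)
def dfFill (length : Int) : Nat → Int → List Int → List Int
  | 0, _, distance => distance
  | fuel+1, index, distance =>
    if index < length then dfFill length fuel (index + 1) (distance ++ [length]) else distance

-- outer `while index < length` loop; fuel bounds the number of iterations (index grows by ≥ 1)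
def dfLoop (sequence : List Int) (item : Int) (length : Int) : Nat → Int → List Int → List Int
  | 0, _, distance => distance
  | fuel+1, index, distance =>
    if index < length then
      match PySem.List.pyGet? sequence index with
      | none => distance   -- unreachable: 0 ≤ index < len(sequence)
      | some v =>
        if v ≠ item then
          match PySem.List.index? (PySem.List.slice sequence (some index) none) item with
          | some next_false =>
              dfLoop sequence item length fuel (index + (next_false : Int))
                ((PySem.List.pyRange (next_false : Int) 0 (-1)).foldl
                  (fun acc d => acc ++ [d]) distance)
          | none => dfFill length (fuel + 1) index distance
        else dfLoop sequence item length fuel (index + 1) (distance ++ [0])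
    else distance

def distance_forward (sequence : List Int) (item : Int) : List Int :=
  dfLoop sequence item (sequence.length : Int) sequence.length 0 []

-- ===== PORT B =====
-- backward pass (Source B's reversed loop as structural recursion from the right):
-- returns (dist after this suffix, output list for this suffix)
def dfBack (item : Int) (n : Int) : List Int → Int × List Int
  | [] => (n, [])
  | x :: xs =>
    let p := dfBack item n xs
    let d := if x = item then 0 else if p.1 < n then p.1 + 1 else n
    (d, d :: p.2)

def distance_forward_alt (sequence : List Int) (item : Int) : List Int :=
  (dfBack item (sequence.length : Int) sequence).2

-- ===== PRECONDITION & SPEC =====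
def Spec_distance_forward (sequence : List Int) (item : Int) (out : List Int) : Prop := out = distance_forward_alt sequence item
instance (sequence : List Int) (item : Int) (out : List Int) : Decidable (Spec_distance_forward sequence item out) := by unfold Spec_distance_forward; infer_instance

-- ===== CLAIM (what is proved, stated in full; the proofs are below) =====
def Claim_equal_distance_forward : Prop := ∀ (sequence : List Int) (item : Int), Dom_distance_forward sequence item → Spec_distance_forward sequence item (distance_forward sequence item)

-- ===== LEMMAS AND PROOFS =====

-- reference value: distance from the head of the suffix to the first occurrence of item, n if absent
def specVal (item n : Int) (xs : List Int) : Int :=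
  match PySem.List.index? xs item with
  | some j => (j : Int)
  | none => n

-- reference output: specVal of every suffix
def specList (item n : Int) : List Int → List Int
  | [] => []
  | x :: xs => specVal item n (x :: xs) :: specList item n xs

theorem index?_lt_length {xs : List Int} {v : Int} {k : Nat}
    (h : PySem.List.index? xs v = some k) : k < xs.length := by
  obtain ⟨hk, _⟩ := PySem.List.getElem_of_index?_eq_some h
  exact hk

theorem specVal_cons_self (item n : Int) (xs : List Int) :
    specVal item n (item :: xs) = 0 := by
  unfold specVal
  rw [PySem.List.index?_cons_self]
  rfl

theorem specVal_cons_ne_some {x item : Int} (n : Int) {xs : List Int} {j : Nat}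
    (hx : x ≠ item) (h : PySem.List.index? xs item = some j) :
    specVal item n (x :: xs) = (j : Int) + 1 := by
  unfold specVal
  rw [PySem.List.index?_cons_of_ne xs hx, h]
  simp

theorem specVal_cons_ne_none {x item : Int} (n : Int) {xs : List Int}
    (hx : x ≠ item) (h : PySem.List.index? xs item = none) :
    specVal item n (x :: xs) = n := by
  unfold specVal
  rw [PySem.List.index?_cons_of_ne xs hx, h]
  rfl

theorem specVal_of_none {item : Int} (n : Int) {xs : List Int}
    (h : PySem.List.index? xs item = none) : specVal item n xs = n := by
  unfold specVal
  rw [h]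

-- B equals the reference
theorem dfBack_eq (item n : Int) (xs : List Int) (h : (xs.length : Int) ≤ n) :
    dfBack item n xs = (specVal item n xs, specList item n xs) := by
  induction xs with
  | nil => simp [dfBack, specVal, PySem.List.index?, specList]
  | cons x xs ih =>
    have hlen : (xs.length : Int) ≤ n := by simp at h; omega
    simp only [dfBack, ih hlen, specList]
    by_cases hx : x = item
    · subst hx
      rw [specVal_cons_self]
      simp
    · cases hidx : PySem.List.index? xs item with
      | none =>
        rw [specVal_cons_ne_none n hx hidx, specVal_of_none n hidx]
        simp [hx]
      | some j =>
        have hj : (j : Int) < n := by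
          have := index?_lt_length hidx; omega
        rw [specVal_cons_ne_some n hx hidx]
        unfold specVal
        rw [hidx]
        simp [hx, hj]

theorem specList_of_not_mem (item n : Int) (xs : List Int)
    (h : PySem.List.index? xs item = none) :
    specList item n xs = List.replicate xs.length n := by
  induction xs with
  | nil => simp [specList]
  | cons x xs ih =>
    have hnm : item ∉ x :: xs := (PySem.List.index?_eq_none_iff _ _).1 h
    have hx : x ≠ item := fun he => hnm (by simp [he])
    have htail : PySem.List.index? xs item = none :=
      (PySem.List.index?_eq_none_iff _ _).2 (fun hm => hnm (List.mem_cons_of_mem _ hm))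
    rw [specList, specVal_cons_ne_none n hx htail, ih htail]
    simp [List.replicate_succ]

theorem pyRange_neg_one_cons (k : Int) (h : 0 ≤ k) :
    PySem.List.pyRange (k + 1) 0 (-1) = (k + 1) :: PySem.List.pyRange k 0 (-1) := by
  have h1 : (k + 1).toNat = k.toNat + 1 := by omega
  rcases eq_or_lt_of_le h with h0 | h0
  · subst h0; decide
  · simp [PySem.List.pyRange, h, h0, h1, List.range_succ_eq_map, List.map_map, Function.comp]

-- the gap: from a position whose next occurrence is k away, the reference counts down k, k-1, …, 1
theorem specList_gap (item n : Int) (xs : List Int) (k : Nat)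
    (h : PySem.List.index? xs item = some k) :
    specList item n xs = PySem.List.pyRange (k : Int) 0 (-1) ++ specList item n (xs.drop k) := by
  induction xs generalizing k with
  | nil => simp [PySem.List.index?] at h
  | cons x xs ih =>
    by_cases hx : x = item
    · subst hx
      rw [PySem.List.index?_cons_self] at h
      obtain rfl : (0 : Nat) = k := Option.some.inj h
      simp [PySem.List.pyRange]
    · rw [PySem.List.index?_cons_of_ne xs hx] at h
      cases hidx : PySem.List.index? xs item with
      | none => rw [hidx] at h; simp at h
      | some j =>
        rw [hidx] at h
        simp only [Option.map_some] at h
        obtain rfl : j + 1 = k := Option.some.inj h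
        have hr : PySem.List.pyRange ((j : Int) + 1) 0 (-1)
            = ((j : Int) + 1) :: PySem.List.pyRange (j : Int) 0 (-1) :=
          pyRange_neg_one_cons _ (by positivity)
        rw [specList, specVal_cons_ne_some n hx hidx, ih j hidx]
        rw [show ((j + 1 : Nat) : Int) = (j : Int) + 1 by push_cast; ring, hr]
        simp

theorem dfFill_eq (n : Int) (fuel : Nat) (index : Int) (acc : List Int)
    (hf : (n - index).toNat ≤ fuel) :
    dfFill n fuel index acc = acc ++ List.replicate (n - index).toNat n := by
  induction fuel generalizing index acc with
  | zero =>
    have : (n - index).toNat = 0 := by omega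
    simp [dfFill, this]
  | succ fuel ih =>
    by_cases h : index < n
    · have hc : (n - index).toNat = (n - (index + 1)).toNat + 1 := by omega
      rw [dfFill, if_pos h, ih (index + 1) (acc ++ [n]) (by omega), hc]
      simp [List.replicate_succ]
    · have : (n - index).toNat = 0 := by omega
      simp [dfFill, h, this]

theorem dfLoop_eq (sequence : List Int) (item : Int) (fuel : Nat) (index : Int)
    (acc : List Int) (h0 : 0 ≤ index)
    (hf : ((sequence.length : Int) - index).toNat ≤ fuel) :
    dfLoop sequence item (sequence.length : Int) fuel index acc
      = acc ++ specList item (sequence.length : Int) (sequence.drop index.toNat) := by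
  induction fuel generalizing index acc with
  | zero =>
    have hge : sequence.length ≤ index.toNat := by omega
    rw [List.drop_of_length_le hge]
    simp [dfLoop, specList]
  | succ fuel ih =>
    by_cases h : index < (sequence.length : Int)
    · have hidxlt : index.toNat < sequence.length := by omega
      have hdrop : sequence.drop index.toNat
          = sequence[index.toNat] :: sequence.drop (index.toNat + 1) := by
        exact (List.drop_eq_getElem_cons hidxlt)
      have hget : PySem.List.pyGet? sequence index = some sequence[index.toNat] :=
        PySem.List.pyGet?_eq_some_getElem sequence h0 (by omega)
      set v := sequence[index.toNat] with hv
      by_cases hvi : v = item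
      · rw [dfLoop]
        simp only [if_pos h, hget, hvi, ite_not]
        rw [ih (index + 1) (acc ++ [0]) (by omega) (by omega)]
        have h1 : (index + 1).toNat = index.toNat + 1 := by omega
        rw [h1, hdrop, specList]
        have : specVal item (sequence.length : Int) (v :: sequence.drop (index.toNat + 1)) = 0 := by
          rw [hvi]; exact specVal_cons_self _ _ _
        rw [this]
        simp
      · rw [dfLoop]
        simp only [if_pos h, hget, ne_eq, hvi, not_false_eq_true, if_pos]
        have hslice : PySem.List.slice sequence (some index) none = sequence.drop index.toNat :=
          PySem.List.slice_from sequence h0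
        rw [hslice]
        split
        next k hidx =>
          have hk1 : 1 ≤ k := by
            rcases Nat.eq_zero_or_pos k with rfl | hpos
            · exfalso
              obtain ⟨pre, suf, hxs, hprelen, -⟩ := (PySem.List.index?_eq_some_iff _ _ _).1 hidx
              have hpre : pre = [] := List.eq_nil_of_length_eq_zero hprelen
              subst hpre
              rw [hdrop] at hxs
              simp at hxs
              exact hvi hxs.1
            · exact hpos
          have hklen : k < (sequence.drop index.toNat).length := index?_lt_length hidx
          have hlen' : (sequence.drop index.toNat).length = sequence.length - index.toNat :=
            List.length_drop
          rw [PySem.List.foldl_append_singleton]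
          rw [ih (index + (k : Int)) _ (by omega) (by omega)]
          have h2 : (index + (k : Int)).toNat = index.toNat + k := by omega
          rw [h2, ← List.drop_drop]
          rw [specList_gap item _ _ k hidx]
          simp
        next hidx =>
          rw [dfFill_eq _ _ _ _ (by omega)]
          rw [specList_of_not_mem _ _ _ hidx]
          have : (sequence.drop index.toNat).length = ((sequence.length : Int) - index).toNat := by
            simp [List.length_drop]; omega
          rw [this]
    · have hge : sequence.length ≤ index.toNat := by omega
      rw [List.drop_of_length_le hge]
      simp [dfLoop, h, specList]

-- ===== VERDICT (by name: the statement is the Claim_ definition above) =====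
theorem distance_forward_spec : Claim_equal_distance_forward := by
  intro sequence item _
  unfold Spec_distance_forward distance_forward distance_forward_alt
  rw [dfLoop_eq sequence item sequence.length 0 [] le_rfl (by omega)]
  rw [(dfBack_eq item (sequence.length : Int) sequence le_rfl)]
  simp
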